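-- pv_equiv track=rewrite | github.com/juliefolkerts/pp1 | 09-Test2/mock/B2.py | f
-- ===== SOURCE A (Python) =====
-- def f(d):
--     arrd = list(d)
--     count = 0
--     for i in range(0,len(arrd)):
--         if arrd[i] == '+':
--             count += 1
--         else:
--             count -= 1
--     return count
-- ===== SOURCE B (Python) =====
-- def f(d):
--     p = d.count('+')
--     return 2 * p - len(d)
-- ===== Notes on version B (the rewrite author's own statement) =====
-- stated objective: simpler
-- what changed: Replaced the per-character accumulator loop with the closed form 2*d.count('+') - len(d).
import Mathlib
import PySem

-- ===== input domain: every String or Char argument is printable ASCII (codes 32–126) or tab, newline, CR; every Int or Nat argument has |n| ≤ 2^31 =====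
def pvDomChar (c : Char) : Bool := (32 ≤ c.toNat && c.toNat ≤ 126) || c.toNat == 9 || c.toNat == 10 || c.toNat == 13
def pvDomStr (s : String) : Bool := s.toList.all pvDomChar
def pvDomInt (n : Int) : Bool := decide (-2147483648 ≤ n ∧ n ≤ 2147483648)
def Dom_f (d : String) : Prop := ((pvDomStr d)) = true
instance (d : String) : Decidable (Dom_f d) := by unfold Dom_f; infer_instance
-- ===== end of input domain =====

-- B replaces A's per-character accumulator loop with the closed form 2*d.count('+') - len(d) (simpler).

-- ===== PORT A =====
-- for i in range(0, len(arrd)): if arrd[i] == '+': count += 1 else: count -= 1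
-- arrd[i] is always in range here, so pyGetD's default is never consulted.
def f (d : String) : Int :=
  (PySem.List.pyRange 0 (d.toList.length : Int) 1).foldl
    (fun count i => if PySem.List.pyGetD d.toList i ' ' == '+' then count + 1 else count - 1) 0

-- ===== PORT B =====
-- d.count('+') with a single-character pattern equals the count of that character; ported exactly as List.count on d.toList.
def f_alt (d : String) : Int :=
  2 * (d.toList.count '+' : Int) - (d.toList.length : Int)

-- ===== PRECONDITION & SPEC =====
def Spec_f (d : String) (out : Int) : Prop := out = f_alt d
instance (d : String) (out : Int) : Decidable (Spec_f d out) := by unfold Spec_f; infer_instance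

-- ===== CLAIM (what is proved, stated in full; the proofs are below) =====
def Claim_equal_f : Prop := ∀ (d : String), Dom_f d → Spec_f d (f d)

-- ===== LEMMAS AND PROOFS =====
theorem pv_foldl_pm (l : List Char) (a : Int) :
    l.foldl (fun count x => if x == '+' then count + 1 else count - 1) a
      = a + 2 * (l.count '+' : Int) - (l.length : Int) := by
  induction l generalizing a with
  | nil => simp
  | cons x t ih =>
    rw [List.foldl_cons, ih]
    by_cases hx : x = '+'
    · simp [hx]
      ring
    · simp [hx]
      ring

-- ===== VERDICT (by name: the statement is the Claim_ definition above) =====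
theorem f_spec : Claim_equal_f := by
  intro d _
  unfold Spec_f f f_alt
  rw [PySem.List.foldl_pyRange_zero_pyGetD' (f := fun (count : Int) (c : Char) => if c == '+' then count + 1 else count - 1)]
  rw [pv_foldl_pm]
  ring
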